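-- pv_equiv track=rewrite | github.com/Nolano4090/neuroMesh | question_1.py | compute_source_sub_sequence
-- ===== SOURCE A (Python) =====
-- def compute_source_sub_sequence(source: str, target: str) -> int:
--     """
--     compute_source_sub_sequence matches the target string with source string to compute
--     how many sources strings are needed to concatenate the target string
--     :param source: the original string
--     :param target: the target string to be matched
--     :return int
--     """
--     source_ptr, target_ptr = 0, 0
--     count = 0
--     alphabets = set(source)
--     while target_ptr < len(target):
--         if target[target_ptr] not in alphabets:
--             return -1
--         if source[source_ptr] == target[target_ptr]:
--             target_ptr += 1
--         source_ptr += 1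
--         if source_ptr == len(source):
--             source_ptr = 0
--             count += 1
--     return count
-- ===== SOURCE B (Python) =====
-- def _bisect_left(a, x):
--     lo, hi = 0, len(a)
--     while lo < hi:
--         mid = (lo + hi) // 2
--         if a[mid] < x:
--             lo = mid + 1
--         else:
--             hi = mid
--     return lo
--
--
-- def compute_source_sub_sequence(source: str, target: str) -> int:
--     # Index the source once: for each character, the sorted list of its
--     # positions; then each target character jumps to its next occurrence
--     # with a binary search instead of scanning the source linearly.
--     pos = {}
--     for i, ch in enumerate(source):
--         pos.setdefault(ch, []).append(i)
--     n = len(source)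
--     cur = 0       # next source position available for matching
--     wraps = 0     # number of times the scan passed the end of source
--     for ch in target:
--         lst = pos.get(ch)
--         if lst is None:
--             return -1
--         j = _bisect_left(lst, cur)
--         if j == len(lst):
--             wraps += 1
--             idx = lst[0]
--         else:
--             idx = lst[j]
--         cur = idx + 1
--         if cur == n:
--             cur = 0
--             wraps += 1
--     return wraps
-- ===== Notes on version B (the rewrite author's own statement) =====
-- stated objective: alternative
-- what changed: A walks the source string character by character (cyclically) for every target character; B builds a per-character sorted list of source positions once and finds each target character's next occurrence with a binary search, counting wraps.
import Mathlib
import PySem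

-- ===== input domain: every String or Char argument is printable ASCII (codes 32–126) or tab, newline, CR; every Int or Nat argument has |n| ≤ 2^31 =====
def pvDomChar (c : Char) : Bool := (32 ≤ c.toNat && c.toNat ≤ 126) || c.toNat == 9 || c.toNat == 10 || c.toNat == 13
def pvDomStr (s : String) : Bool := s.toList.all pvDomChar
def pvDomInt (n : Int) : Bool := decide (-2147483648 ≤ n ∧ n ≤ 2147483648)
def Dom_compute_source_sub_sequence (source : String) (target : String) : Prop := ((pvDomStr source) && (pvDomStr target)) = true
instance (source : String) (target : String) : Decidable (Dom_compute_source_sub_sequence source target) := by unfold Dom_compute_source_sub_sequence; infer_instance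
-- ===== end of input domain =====

-- B replaces A's linear cyclic scan of `source` per target character by a per-character
-- index of source positions consulted with binary search (objective: alternative algorithm).

-- ===== PORT A =====
-- A's single while loop, split at its two kinds of progress: pvScanA is the run of
-- iterations that share one target character (each step is one iteration of the while
-- loop: advance source_ptr, wrap and count at the end of source, stop once matched);
-- the cyclic visiting order source_ptr, …, n-1, 0, …, source_ptr-1 is the traversal of
-- src.drop sp ++ src.take sp.  pvLoopA does the per-target-character work; the
-- `not in alphabets` test, re-evaluated unchanged by every while iteration in A, is
-- checked once per target character (target_ptr does not move in between).  A never
-- calls pvScanA's none branch: the scan visits all of src and c ∈ alphabets.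
def pvScanA (src : List Char) (c : Char) : List Char → Nat → Int → Option (Nat × Int)
  | [], _, _ => none
  | d :: rot, sp, count =>
    let st := if sp + 1 = src.length then (0, count + 1) else (sp + 1, count)
    if d == c then some st else pvScanA src c rot st.1 st.2

def pvLoopA (src : List Char) (alphabets : PySem.Set Char) : List Char → Nat → Int → Int
  | [], _, count => count
  | c :: tgt, sp, count =>
    if alphabets.contains c then
      match pvScanA src c (src.drop sp ++ src.take sp) sp count with
      | some (sp', count') => pvLoopA src alphabets tgt sp' count'
      | none => -1
    else -1

def compute_source_sub_sequence (source : String) (target : String) : Int :=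
  pvLoopA source.toList (PySem.Set.ofList source.toList) target.toList 0 0

-- ===== PORT B =====
-- Source B's index build: pos.setdefault(ch, []).append(i) over enumerate(source).
def pvBuildPos (src : List Char) : PySem.Dict Char (List Int) :=
  (PySem.List.enumerate src).foldl
    (fun d p => d.modify p.2 [] (fun l => l ++ [p.1])) PySem.Dict.empty

-- Source B's main loop; its hand-written _bisect_left is CPython's bisect_left loop,
-- ported as PySem.List.bisectLeft (the same binary search).
def pvLoopB (src : List Char) (pos : PySem.Dict Char (List Int)) : List Char → Int → Int → Int
  | [], _, wraps => wraps
  | c :: tgt, cur, wraps =>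
    match pos.get? c with
    | none => -1
    | some lst =>
      let j := PySem.List.bisectLeft lst cur
      let wi := if j = lst.length then (wraps + 1, lst.getD 0 0) else (wraps, lst.getD j 0)
      let cur' := wi.2 + 1
      if cur' = (src.length : Int) then pvLoopB src pos tgt 0 (wi.1 + 1)
      else pvLoopB src pos tgt cur' wi.1

def compute_source_sub_sequence_alt (source : String) (target : String) : Int :=
  pvLoopB source.toList (pvBuildPos source.toList) target.toList 0 0

-- ===== PRECONDITION & SPEC =====
def Spec_compute_source_sub_sequence (source : String) (target : String) (out : Int) : Prop := out = compute_source_sub_sequence_alt source target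
instance (source : String) (target : String) (out : Int) : Decidable (Spec_compute_source_sub_sequence source target out) := by unfold Spec_compute_source_sub_sequence; infer_instance

-- ===== CLAIM (what is proved, stated in full; the proofs are below) =====
def Claim_equal_compute_source_sub_sequence : Prop := ∀ (source : String) (target : String), Dom_compute_source_sub_sequence source target → Spec_compute_source_sub_sequence source target (compute_source_sub_sequence source target)

-- ===== LEMMAS AND PROOFS =====

-- the positions list B's dict stores for character c
def posL (src : List Char) (c : Char) : List Int :=
  ((PySem.List.enumerate src).filter (fun p => p.2 == c)).map (·.1)

lemma getD_buildPos (src : List Char) (c : Char) :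
    (pvBuildPos src).getD c [] = posL src c := by
  unfold pvBuildPos posL
  rw [show (PySem.List.enumerate src).foldl
        (fun d p => d.modify p.2 [] (fun l => l ++ [p.1])) PySem.Dict.empty
      = ((PySem.List.enumerate src).map (fun p => (p.2, p.1))).foldl
        (fun d p => d.modify p.1 [] (fun l => l ++ [p.2])) PySem.Dict.empty from
    (List.foldl_map (f := fun p : Int × Char => (p.2, p.1))
      (g := fun (d : PySem.Dict Char (List Int)) p => d.modify p.1 [] (fun l => l ++ [p.2]))
      (l := PySem.List.enumerate src) (init := PySem.Dict.empty)).symm]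
  rw [PySem.Dict.getD_foldl_modify_append]
  simp [List.filter_map, List.map_map, Function.comp_def]

lemma keys_buildPos (src : List Char) :
    (pvBuildPos src).keys = PySem.Set.ofList src := by
  unfold pvBuildPos
  rw [PySem.Dict.keys_foldl_modify_key (PySem.List.enumerate src) (fun p => p.2) []
    (fun _ p => (fun l => l ++ [p.1])) PySem.Dict.empty]
  rw [PySem.List.map_snd_enumerate]
  rfl

lemma get?_buildPos_of_not_mem {src : List Char} {c : Char} (hc : c ∉ src) :
    (pvBuildPos src).get? c = none := by
  rw [PySem.Dict.get?_eq_none_iff_not_mem_keys, keys_buildPos, PySem.Set.mem_ofList]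
  exact hc

lemma get?_buildPos_of_mem {src : List Char} {c : Char} (hc : c ∈ src) :
    (pvBuildPos src).get? c = some (posL src c) := by
  have hne : (pvBuildPos src).get? c ≠ none := by
    intro h
    rw [PySem.Dict.get?_eq_none_iff_not_mem_keys, keys_buildPos, PySem.Set.mem_ofList] at h
    exact h hc
  cases hv : (pvBuildPos src).get? c with
  | none => exact absurd hv hne
  | some v =>
    have := getD_buildPos src c
    rw [PySem.Dict.getD_eq_get?_getD, hv] at this
    simp at this
    rw [this]

lemma mem_posAux (c : Char) :
    ∀ (src : List Char) (s : Int) (i : Int),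
      i ∈ ((PySem.List.enumerate src s).filter (fun p => p.2 == c)).map (·.1) ↔
        ∃ m : Nat, ∃ h : m < src.length, src[m]'h = c ∧ i = s + m := by
  intro src
  induction src with
  | nil => intro s i; simp [PySem.List.enumerate]
  | cons d t ih =>
    intro s i
    rw [PySem.List.enumerate_cons]
    by_cases hd : d = c
    · subst hd
      rw [show List.filter (fun p : Int × Char => p.2 == d) ((s, d) :: PySem.List.enumerate t (s + 1))
            = (s, d) :: List.filter (fun p : Int × Char => p.2 == d) (PySem.List.enumerate t (s + 1)) from
          List.filter_cons_of_pos (by simp)]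
      rw [List.map_cons, List.mem_cons, ih]
      constructor
      · rintro (rfl | ⟨m, hm, hmc, rfl⟩)
        · exact ⟨0, by simp, by simp, by simp⟩
        · exact ⟨m + 1, by simp only [List.length_cons]; omega, by simpa using hmc, by push_cast; ring⟩
      · rintro ⟨m, hm, hmc, rfl⟩
        cases m with
        | zero => left; simp
        | succ m =>
          right
          refine ⟨m, by simp only [List.length_cons] at hm; omega, by simpa using hmc, by push_cast; ring⟩
    · rw [show List.filter (fun p : Int × Char => p.2 == c) ((s, d) :: PySem.List.enumerate t (s + 1))
            = List.filter (fun p : Int × Char => p.2 == c) (PySem.List.enumerate t (s + 1)) from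
          List.filter_cons_of_neg (by simpa using hd)]
      rw [ih]
      constructor
      · rintro ⟨m, hm, hmc, rfl⟩
        exact ⟨m + 1, by simp only [List.length_cons]; omega, by simpa using hmc, by push_cast; ring⟩
      · rintro ⟨m, hm, hmc, rfl⟩
        cases m with
        | zero => exact absurd (by simpa using hmc : d = c) hd
        | succ m =>
          exact ⟨m, by simp only [List.length_cons] at hm; omega, by simpa using hmc, by push_cast; ring⟩

lemma mem_posL {src : List Char} {c : Char} {i : Int} :
    i ∈ posL src c ↔ ∃ m : Nat, ∃ h : m < src.length, src[m]'h = c ∧ i = m := by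
  have := mem_posAux c src 0 i
  simpa [posL] using this

lemma pairwise_posL (src : List Char) (c : Char) :
    (posL src c).Pairwise (· < ·) := by
  have h2 := (List.filter_sublist (p := fun p => p.2 == c)
      (l := PySem.List.enumerate src)).map (fun p : Int × Char => p.1)
  have h3 : ((PySem.List.enumerate src).map (fun p : Int × Char => p.1)).Pairwise (· < ·) := by
    rw [PySem.List.map_fst_enumerate]
    exact PySem.List.pairwise_lt_pyRange_one 0 _
  exact h3.sublist h2

-- A's run of while-iterations over a contiguous segment of source positions
lemma scanA_seg (src : List Char) (c : Char) :
    ∀ (seg rest : List Char) (p : Nat) (count : Int),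
      p < src.length → p + seg.length ≤ src.length →
      pvScanA src c (seg ++ rest) p count =
        match seg.findIdx? (fun d => d == c) with
        | some k =>
            if p + k + 1 = src.length then some (0, count + 1) else some (p + k + 1, count)
        | none =>
            pvScanA src c rest (if p + seg.length = src.length then 0 else p + seg.length)
              (if p + seg.length = src.length then count + 1 else count) := by
  intro seg
  induction seg with
  | nil =>
    intro rest p count h1 _
    simp [List.findIdx?_nil, Nat.ne_of_lt h1]
  | cons d seg' ih =>
    intro rest p count h1 h2
    rw [List.cons_append]
    show (if (d == c) = true then some (if p + 1 = src.length then (0, count + 1) else (p + 1, count))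
          else pvScanA src c (seg' ++ rest)
            (if p + 1 = src.length then (0, count + 1) else (p + 1, count)).1
            (if p + 1 = src.length then (0, count + 1) else (p + 1, count)).2) = _
    rw [List.findIdx?_cons]
    by_cases hdc : (d == c) = true
    · rw [if_pos hdc, if_pos hdc]
      by_cases hw : p + 1 = src.length
      · simp [hw]
      · simp [hw]
    · rw [if_neg hdc, if_neg hdc]
      by_cases hw : p + 1 = src.length
      · have hseg' : seg' = [] := by
          have : seg'.length = 0 := by simp only [List.length_cons] at h2; omega
          exact List.eq_nil_of_length_eq_zero this
        subst hseg'
        simp only [if_pos hw, List.nil_append, List.findIdx?_nil, Option.map_none]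
        simp only [List.length_cons, List.length_nil]
        rw [if_pos (by omega), if_pos (by omega)]
      · rw [if_neg hw]
        rw [ih rest (p + 1) count (by omega) (by simp only [List.length_cons] at h2; omega)]
        cases hfi : seg'.findIdx? (fun d => d == c) with
        | none =>
          simp only [Option.map_none, List.length_cons]
          have e1 : p + 1 + seg'.length = p + (seg'.length + 1) := by omega
          rw [e1]
          rfl
        | some k =>
          simp only [Option.map_some]
          have e1 : p + 1 + k + 1 = p + (k + 1) + 1 := by omega
          rw [e1]

lemma scanA_seg_some (src : List Char) (c : Char) (seg rest : List Char) (p : Nat) (count : Int)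
    (k : Nat) (h1 : p < src.length) (h2 : p + seg.length ≤ src.length)
    (hfi : seg.findIdx? (fun d => d == c) = some k) :
    pvScanA src c (seg ++ rest) p count =
      if p + k + 1 = src.length then some (0, count + 1) else some (p + k + 1, count) := by
  have h := scanA_seg src c seg rest p count h1 h2
  rw [hfi] at h
  exact h

lemma scanA_seg_none (src : List Char) (c : Char) (seg rest : List Char) (p : Nat) (count : Int)
    (h1 : p < src.length) (h2 : p + seg.length ≤ src.length)
    (hfi : seg.findIdx? (fun d => d == c) = none) :
    pvScanA src c (seg ++ rest) p count =
      pvScanA src c rest (if p + seg.length = src.length then 0 else p + seg.length)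
        (if p + seg.length = src.length then count + 1 else count) := by
  have h := scanA_seg src c seg rest p count h1 h2
  rw [hfi] at h
  exact h

lemma loop_eq (src : List Char) :
    ∀ (tgt : List Char) (sp : Nat) (count : Int), sp < src.length →
      pvLoopA src (PySem.Set.ofList src) tgt sp count =
        pvLoopB src (pvBuildPos src) tgt (sp : Int) count := by
  intro tgt
  induction tgt with
  | nil => intro sp count _; rfl
  | cons c tgt ih =>
    intro sp count hsp
    by_cases hc : c ∈ src
    case neg =>
      have hcont : (PySem.Set.ofList src).contains c = false := by
        rw [← Bool.not_eq_true, PySem.Set.contains_iff, PySem.Set.mem_ofList]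
        exact hc
      simp only [pvLoopA, pvLoopB, get?_buildPos_of_not_mem hc, hcont]
      simp
    case pos =>
      have hcont : (PySem.Set.ofList src).contains c = true :=
        (PySem.Set.contains_iff _ _).2 ((PySem.Set.mem_ofList _ _).2 hc)
      have hget := get?_buildPos_of_mem hc
      have hpwlt := pairwise_posL src c
      have hpwle : (posL src c).Pairwise (· ≤ ·) := hpwlt.imp le_of_lt
      obtain ⟨hjle, hlt, hge⟩ := PySem.List.bisectLeft_spec (posL src c) (sp : Int) hpwle
      have hmono : ∀ (u v : Nat) (hu : u < (posL src c).length) (hv : v < (posL src c).length),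
          u < v → (posL src c)[u] < (posL src c)[v] :=
        fun u v hu hv huv => (List.pairwise_iff_getElem.1 hpwlt) u v hu hv huv
      by_cases hjlen : PySem.List.bisectLeft (posL src c) (sp : Int) = (posL src c).length
      · -- no occurrence of c at a position ≥ sp: B wraps, A scans past the end
        have hdropnone : (src.drop sp).findIdx? (fun d => d == c) = none := by
          rw [List.findIdx?_eq_none_iff]
          intro x hx
          by_contra hxx
          have hxc : x = c := by simpa using hxx
          obtain ⟨t, ht, hxt⟩ := List.mem_iff_getElem.1 hx
          have htn : sp + t < src.length := by rw [List.length_drop] at ht; omega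
          have hmem : ((sp + t : Nat) : Int) ∈ posL src c :=
            mem_posL.2 ⟨sp + t, htn, by rw [← List.getElem_drop (h := ht), hxt]; exact hxc, rfl⟩
          obtain ⟨u, hu, huv⟩ := List.mem_iff_getElem.1 hmem
          have := hlt u hu (by rw [hjlen]; exact hu)
          rw [huv] at this
          push_cast at this
          omega
        have hctake : c ∈ src.take sp := by
          have hsplit : c ∈ src.take sp ++ src.drop sp := by
            rw [List.take_append_drop]; exact hc
          rcases List.mem_append.1 hsplit with h | h
          · exact h
          · have := (List.findIdx?_eq_none_iff.1 hdropnone) c h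
            simp at this
        cases hfi : (src.take sp).findIdx? (fun d => d == c) with
        | none =>
          have := (List.findIdx?_eq_none_iff.1 hfi) c hctake
          simp at this
        | some k' =>
          obtain ⟨hk'len, hk'val, hk'min⟩ := List.findIdx?_eq_some_iff_getElem.1 hfi
          have hk'sp : k' < sp := by rw [List.length_take] at hk'len; omega
          have hk'n : k' < src.length := by omega
          have hk'src : src[k']'hk'n = c := by
            have h1 : (src.take sp)[k']'hk'len = src[k']'hk'n := List.getElem_take
            rw [← h1]; simpa using hk'val
          have hk'memL : ((k' : Nat) : Int) ∈ posL src c := mem_posL.2 ⟨k', hk'n, hk'src, rfl⟩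
          have hL0 : 0 < (posL src c).length := List.length_pos_of_mem hk'memL
          have hL0val : (posL src c)[0]'hL0 = (k' : Int) := by
            obtain ⟨m0, hm0n, hm0c, hm0v⟩ := mem_posL.1 (List.getElem_mem hL0)
            obtain ⟨u, hu, huv⟩ := List.mem_iff_getElem.1 hk'memL
            have hle1 : (posL src c)[0]'hL0 ≤ (k' : Int) := by
              rcases Nat.eq_zero_or_pos u with h0 | h0
              · subst h0; rw [huv]
              · have := hmono 0 u hL0 hu h0
                rw [huv] at this; exact le_of_lt this
            have hlt0 : (posL src c)[0]'hL0 < (sp : Int) := hlt 0 hL0 (by rw [hjlen]; exact hL0)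
            have hm0sp : m0 < sp := by rw [hm0v] at hlt0; exact_mod_cast hlt0
            have hk'le : k' ≤ m0 := by
              by_contra h
              have hmk : m0 < k' := by omega
              have habs := hk'min m0 hmk
              have : ((src.take sp)[m0]'(by rw [List.length_take]; omega) == c) = true := by
                have h2 : (src.take sp)[m0]'(by rw [List.length_take]; omega) = src[m0]'hm0n :=
                  List.getElem_take
                rw [h2, hm0c]; simp
              exact habs this
            have hm0le : m0 ≤ k' := by
              rw [hm0v] at hle1; exact_mod_cast hle1
            rw [hm0v]
            exact_mod_cast (by omega : m0 = k')
          -- A side: scan the rest of source (no match), wrap, find c at k' in the prefix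
          have hdl : sp + (src.drop sp).length = src.length := by rw [List.length_drop]; omega
          have hA := scanA_seg_none src c (src.drop sp) (src.take sp) sp count hsp
            (by omega) hdropnone
          rw [if_pos hdl, if_pos hdl] at hA
          have hA2 := scanA_seg_some src c (src.take sp) [] 0 (count + 1) k' (by omega)
            (by rw [List.length_take]; omega) hfi
          rw [List.append_nil] at hA2
          rw [if_neg (by omega : ¬ (0 + k' + 1 = src.length))] at hA2
          simp only [pvLoopA, pvLoopB, hcont, hget, if_true]
          rw [hA, hA2]
          simp only [if_pos hjlen]
          have hgetD0 : (posL src c).getD 0 0 = (k' : Int) := by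
            rw [List.getD_eq_getElem (posL src c) 0 hL0]; exact hL0val
          rw [hgetD0]
          rw [if_neg (by omega : ¬ ((k' : Int) + 1 = (src.length : Int)))]
          have := ih (k' + 1) (count + 1) (by omega)
          rw [show ((k' + 1 : Nat) : Int) = (k' : Int) + 1 by push_cast; ring] at this
          simpa using this
      · -- c occurs at a position ≥ sp: both land on the first such position
        have hjlt : PySem.List.bisectLeft (posL src c) (sp : Int) < (posL src c).length :=
          lt_of_le_of_ne hjle hjlen
        have hj0 := hge _ hjlt (le_refl _)
        obtain ⟨m0, hm0n, hm0c, hm0v⟩ := mem_posL.1 (List.getElem_mem hjlt)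
        have hspm0 : sp ≤ m0 := by rw [hm0v] at hj0; exact_mod_cast hj0
        have hfi : (src.drop sp).findIdx? (fun d => d == c) = some (m0 - sp) := by
          rw [List.findIdx?_eq_some_iff_getElem]
          refine ⟨by rw [List.length_drop]; omega, ?_, ?_⟩
          · rw [List.getElem_drop]
            have e : sp + (m0 - sp) = m0 := by omega
            simp only [e, hm0c]
            simp
          · intro t ht habs
            rw [List.getElem_drop] at habs
            have htn : sp + t < src.length := by omega
            have hsrc_t : src[sp + t]'htn = c := by simpa using habs
            have hmemt : ((sp + t : Nat) : Int) ∈ posL src c :=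
              mem_posL.2 ⟨sp + t, htn, hsrc_t, rfl⟩
            obtain ⟨u, hu, huv⟩ := List.mem_iff_getElem.1 hmemt
            rcases lt_trichotomy u (PySem.List.bisectLeft (posL src c) (sp : Int)) with h | h | h
            · have := hlt u hu h
              rw [huv] at this; push_cast at this; omega
            · subst h
              have heq := huv.symm.trans hm0v
              have : sp + t = m0 := by exact_mod_cast heq
              omega
            · have := hmono _ u hjlt hu h
              rw [huv, hm0v] at this; push_cast at this; omega
        have hA := scanA_seg_some src c (src.drop sp) (src.take sp) sp count (m0 - sp) hsp
          (by rw [List.length_drop]; omega) hfi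
        rw [show sp + (m0 - sp) + 1 = m0 + 1 by omega] at hA
        have hgetDj : (posL src c).getD (PySem.List.bisectLeft (posL src c) (sp : Int)) 0 = (m0 : Int) := by
          rw [List.getD_eq_getElem (posL src c) 0 hjlt]; exact hm0v
        simp only [pvLoopA, pvLoopB, hcont, hget, if_true]
        rw [hA]
        simp only [if_neg hjlen]
        rw [hgetDj]
        by_cases hwrap : m0 + 1 = src.length
        · rw [if_pos hwrap]
          rw [if_pos (by omega : ((m0 : Int) + 1 = (src.length : Int)))]
          have := ih 0 (count + 1) (by omega)
          simpa using this
        · rw [if_neg hwrap]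
          rw [if_neg (by omega : ¬ ((m0 : Int) + 1 = (src.length : Int)))]
          have := ih (m0 + 1) count (by omega)
          rw [show ((m0 + 1 : Nat) : Int) = (m0 : Int) + 1 by push_cast; ring] at this
          simpa using this

-- ===== VERDICT (by name: the statement is the Claim_ definition above) =====
theorem compute_source_sub_sequence_spec : Claim_equal_compute_source_sub_sequence := by
  intro source target _
  unfold Spec_compute_source_sub_sequence compute_source_sub_sequence compute_source_sub_sequence_alt
  cases hsrc : source.toList with
  | nil =>
    cases target.toList with
    | nil => rfl
    | cons c tgt =>
      simp [pvLoopA, pvLoopB, pvBuildPos, PySem.List.enumerate, PySem.Set.ofList, PySem.Set.contains,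
        PySem.Dict.get?, PySem.Dict.empty]
  | cons d rest =>
    have h0 : 0 < (d :: rest).length := by simp
    have := loop_eq (d :: rest) target.toList 0 0 h0
    simpa using this
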